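-- pv_equiv track=rewrite | github.com/gurujeetkhalsa/aga | bayrate/stage_reports.py | _token_set_compatible
-- ===== SOURCE A (Python) =====
-- def _token_set_compatible(shorter: set[str], longer: set[str]) -> bool:
--     if len(shorter) > len(longer):
--         return False
--     for token in shorter:
--         if token in longer:
--             continue
--         if len(token) == 1 and any(candidate.startswith(token) for candidate in longer):
--             continue
--         return False
--     return True
-- ===== SOURCE B (Python) =====
-- def _token_set_compatible(shorter: set[str], longer: set[str]) -> bool:
--     if len(shorter) > len(longer):
--         return False
--     remaining = set(shorter)
--     for candidate in longer:
--         remaining.discard(candidate)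
--         remaining.discard(candidate[:1])
--     return not remaining
-- ===== Notes on version B (the rewrite author's own statement) =====
-- stated objective: alternative
-- what changed: Inverts the traversal: instead of scanning longer for every token of shorter, B iterates once over longer, discarding each candidate and its first character from a shrinking copy of shorter, and succeeds iff that set is emptied.
import Mathlib
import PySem

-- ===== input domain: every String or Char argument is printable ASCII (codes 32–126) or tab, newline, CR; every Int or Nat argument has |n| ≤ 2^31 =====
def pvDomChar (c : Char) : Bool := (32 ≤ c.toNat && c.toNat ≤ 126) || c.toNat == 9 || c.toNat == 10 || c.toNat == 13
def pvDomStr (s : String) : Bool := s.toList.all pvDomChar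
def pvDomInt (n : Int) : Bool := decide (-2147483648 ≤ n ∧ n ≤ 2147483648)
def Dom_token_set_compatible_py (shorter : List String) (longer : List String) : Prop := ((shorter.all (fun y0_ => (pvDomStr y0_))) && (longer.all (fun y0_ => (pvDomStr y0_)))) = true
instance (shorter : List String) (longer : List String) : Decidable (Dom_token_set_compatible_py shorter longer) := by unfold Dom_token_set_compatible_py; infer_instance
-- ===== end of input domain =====

-- B inverts the traversal: one pass over `longer` discarding each candidate and its first
-- character from a shrinking copy of `shorter`; success iff that set empties (alternative).


-- ===== PORT A =====
def token_set_compatible_py (shorter : List String) (longer : List String) : Bool :=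
  if shorter.length > longer.length then false
  else
    shorter.all (fun token =>
      PySem.Set.contains longer token ||
      (PySem.Str.len token == 1 &&
        longer.any (fun candidate => PySem.Str.startswith candidate token)))

-- ===== PORT B =====
def token_set_compatible_py_alt (shorter : List String) (longer : List String) : Bool :=
  if shorter.length > longer.length then false
  else
    let remaining : PySem.Set String := longer.foldl
      (fun r c => PySem.Set.discard (PySem.Set.discard r c) (PySem.Str.slice c none (some 1)))
      (PySem.Set.ofList shorter)
    remaining.isEmpty

-- ===== PRECONDITION & SPEC =====
def Spec_token_set_compatible_py (shorter : List String) (longer : List String) (out : Bool) : Prop := out = token_set_compatible_py_alt shorter longer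
instance (shorter : List String) (longer : List String) (out : Bool) : Decidable (Spec_token_set_compatible_py shorter longer out) := by unfold Spec_token_set_compatible_py; infer_instance

-- ===== CLAIM =====
def Claim_equal_token_set_compatible_py : Prop := ∀ (shorter : List String) (longer : List String), Dom_token_set_compatible_py shorter longer → Spec_token_set_compatible_py shorter longer (token_set_compatible_py shorter longer)

-- ===== LEMMAS AND PROOFS =====
theorem tsc_single_char (t c : String) (ht : t.toList.length = 1) :
    PySem.Str.startswith c t = true ↔ PySem.Str.slice c none (some 1) = t := by
  rw [PySem.Str.startswith_eq, PySem.Chars.startswith_iff, List.prefix_iff_eq_take, ht]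
  constructor
  · intro h
    apply String.toList_injective
    rw [PySem.Str.toList_slice, PySem.Chars.slice_eq_listSlice,
      PySem.List.slice_to c.toList (by norm_num), Int.toNat_one]
    exact h.symm
  · intro h
    rw [← h, PySem.Str.toList_slice, PySem.Chars.slice_eq_listSlice,
      PySem.List.slice_to c.toList (by norm_num), Int.toNat_one]

theorem tsc_mem_fold (l : List String) (s : PySem.Set String) (t : String) :
    t ∈ l.foldl
      (fun r c => PySem.Set.discard (PySem.Set.discard r c) (PySem.Str.slice c none (some 1)))
      s ↔ t ∈ s ∧ ∀ c ∈ l, t ≠ c ∧ t ≠ PySem.Str.slice c none (some 1) := by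
  induction l generalizing s with
  | nil => simp
  | cons c l ih =>
    simp only [List.foldl_cons, ih, PySem.Set.mem_discard, List.mem_cons]
    constructor
    · rintro ⟨⟨⟨h1, h2⟩, h3⟩, h4⟩
      exact ⟨h1, fun x hx => hx.elim (fun e => e ▸ ⟨h2, h3⟩) (h4 x)⟩
    · rintro ⟨h1, h2⟩
      exact ⟨⟨⟨h1, (h2 c (Or.inl rfl)).1⟩, (h2 c (Or.inl rfl)).2⟩,
        fun x hx => h2 x (Or.inr hx)⟩

theorem tsc_point (t : String) (l : List String) :
    (t ∈ l ∨ ((t.toList.length : Int) = 1 ∧ ∃ c ∈ l, PySem.Str.startswith c t = true))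
      ↔ ∃ c ∈ l, t = c ∨ t = PySem.Str.slice c none (some 1) := by
  constructor
  · rintro (h1 | ⟨hlen, c, hc, hsw⟩)
    · exact ⟨t, h1, Or.inl rfl⟩
    · have hlen1 : t.toList.length = 1 := by exact_mod_cast hlen
      exact ⟨c, hc, Or.inr ((tsc_single_char t c hlen1).1 hsw).symm⟩
  · rintro ⟨c, hc, (rfl | ht)⟩
    · exact Or.inl hc
    · have htl : t.toList = c.toList.take 1 := by
        rw [ht, PySem.Str.toList_slice, PySem.Chars.slice_eq_listSlice,
          PySem.List.slice_to c.toList (by norm_num), Int.toNat_one]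
      by_cases hce : c.toList = []
      · left
        have : t = c := String.toList_injective (by rw [htl, hce]; simp)
        exact this ▸ hc
      · have hpos : 0 < c.toList.length := List.length_pos_iff.2 hce
        have hl1 : t.toList.length = 1 := by rw [htl, List.length_take]; omega
        exact Or.inr ⟨by exact_mod_cast hl1, c, hc, (tsc_single_char t c hl1).2 ht.symm⟩

-- ===== VERDICT =====
theorem token_set_compatible_py_spec : Claim_equal_token_set_compatible_py := by
  intro s l _
  simp only [Spec_token_set_compatible_py, token_set_compatible_py, token_set_compatible_py_alt]
  by_cases h : s.length > l.length
  · simp [h]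
  · rw [if_neg h, if_neg h, Bool.eq_iff_iff]
    simp only [List.all_eq_true, Bool.or_eq_true, PySem.Set.contains_iff, Bool.and_eq_true,
      beq_iff_eq, List.any_eq_true, PySem.Str.len_eq, List.isEmpty_iff,
      List.eq_nil_iff_forall_not_mem, tsc_mem_fold, PySem.Set.mem_ofList]
    constructor
    · intro H t hcon
      obtain ⟨hts, hall⟩ := hcon
      obtain ⟨c, hc, hor⟩ := (tsc_point t l).1 (by
        rcases H t hts with h1 | h2
        · exact Or.inl h1
        · exact Or.inr h2)
      rcases hor with heq | hsl
      · exact (hall c hc).1 heq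
      · exact (hall c hc).2 hsl
    · intro H t hts
      have hne := H t
      push Not at hne
      obtain ⟨c, hc, hcc⟩ := hne hts
      have hor : t = c ∨ t = PySem.Str.slice c none (some 1) := by
        by_cases he : t = c
        · exact Or.inl he
        · exact Or.inr (hcc he)
      have := (tsc_point t l).2 ⟨c, hc, hor⟩
      rcases this with h1 | h2
      · exact Or.inl h1
      · exact Or.inr h2
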